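-- pv_equiv track=rewrite | github.com/win0err/solutions | adventofcode/2023/11-cosmic-expansion/main.py | count_voids
-- ===== SOURCE A (Python) =====
-- EMPTY_SPACE = '.'
--
-- def count_voids(rows):
--
--     cols = list(zip(*rows))
--     w, h = len(cols), len(rows)
--
--     voids_at_x = [0] * w
--     count = 0
--     for x, col in enumerate(cols):
--         voids_at_x[x] = count
--
--         if all(ch == EMPTY_SPACE for ch in col):
--             count += 1
--
--
--     voids_at_y = [0] * h
--     count = 0
--     for y, row in enumerate(rows):
--         voids_at_y[y] = count
--
--         if all(ch == EMPTY_SPACE for ch in row):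
--             count += 1
--
--     return voids_at_x, voids_at_y
-- ===== SOURCE B (Python) =====
-- EMPTY_SPACE = '.'
--
--
-- def _prefix(bools):
--     out, count = [], 0
--     for b in bools:
--         out.append(count)
--         count += bool(b)
--     return out
--
--
-- def count_voids(rows):
--     # One row-major pass: mark which columns (up to the min row width, as
--     # zip truncates) contain a non-empty cell, and record per-row emptiness;
--     # then turn the booleans into exclusive prefix counts.
--     w = min(map(len, rows), default=0)
--     non_empty = set()
--     empty_row = []
--     for row in rows:
--         empty_row.append(all(ch == EMPTY_SPACE for ch in row))
--         for x in range(w):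
--             if row[x] != EMPTY_SPACE:
--                 non_empty.add(x)
--     return _prefix(x not in non_empty for x in range(w)), _prefix(empty_row)
-- ===== Notes on version B (the rewrite author's own statement) =====
-- stated objective: alternative
-- what changed: Replaces the zip(*rows) transpose and per-column all() scans by a single row-major pass that marks non-empty column indices in a set and records per-row emptiness, followed by a shared exclusive-prefix-count pass over the booleans.
import Mathlib
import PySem

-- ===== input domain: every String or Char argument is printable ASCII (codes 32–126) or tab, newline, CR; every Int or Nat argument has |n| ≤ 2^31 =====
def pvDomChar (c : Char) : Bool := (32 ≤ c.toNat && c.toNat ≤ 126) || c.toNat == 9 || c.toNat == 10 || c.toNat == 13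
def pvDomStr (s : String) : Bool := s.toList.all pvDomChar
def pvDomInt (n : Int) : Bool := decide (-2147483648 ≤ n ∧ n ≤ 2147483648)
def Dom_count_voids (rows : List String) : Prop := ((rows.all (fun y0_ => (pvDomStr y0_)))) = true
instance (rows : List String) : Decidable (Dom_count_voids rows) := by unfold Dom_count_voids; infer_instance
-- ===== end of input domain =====

-- B replaces the zip-transpose + per-column all() scans by one row-major pass marking
-- non-empty column indices in a set, then a shared exclusive-prefix-count pass (alternative decomposition).

-- ===== PORT A =====
-- cols = list(zip(*rows)): zip truncates to the minimum row length (0 when rows = []);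
-- column x is the tuple of row[x] over all rows (x < every row's length, so getD's default is never used).
def count_voids (rows : List String) : List Int × List Int :=
  let rs := rows.map String.toList
  let w : Nat := ((rs.map List.length).min?).getD 0
  let cols : List (List Char) := (List.range w).map (fun x => rs.map (fun r => r.getD x ' '))
  -- for x, col in enumerate(cols): voids_at_x[x] = count; if all '.' : count += 1
  let vx := (cols.foldl (fun (acc : List Int × Int) col =>
      (acc.1 ++ [acc.2], if col.all (fun ch => ch = '.') then acc.2 + 1 else acc.2)) ([], 0)).1
  let vy := (rs.foldl (fun (acc : List Int × Int) row =>
      (acc.1 ++ [acc.2], if row.all (fun ch => ch = '.') then acc.2 + 1 else acc.2)) ([], 0)).1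
  (vx, vy)

-- ===== PORT B =====
-- _prefix: exclusive prefix counts of a boolean list
def pvPrefixB (bs : List Bool) : List Int :=
  (bs.foldl (fun (acc : List Int × Int) b =>
      (acc.1 ++ [acc.2], acc.2 + (if b then 1 else 0))) ([], 0)).1

def count_voids_alt (rows : List String) : List Int × List Int :=
  let rs := rows.map String.toList
  let w : Nat := ((rs.map List.length).min?).getD 0
  -- one row-major pass: mark non-empty columns in a set, record per-row emptiness
  -- (row[x] for x in range(w) never raises since w ≤ every row's length: getD's default is never used)
  let st := rs.foldl (fun (st : PySem.Set Nat × List Bool) row =>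
      ((List.range w).foldl (fun s x => if row.getD x ' ' ≠ '.' then PySem.Set.add s x else s) st.1,
       st.2 ++ [row.all (fun ch => ch = '.')])) (PySem.Set.ofList [], [])
  (pvPrefixB ((List.range w).map (fun x => !(PySem.Set.contains st.1 x))), pvPrefixB st.2)

-- ===== PRECONDITION & SPEC =====
def Spec_count_voids (rows : List String) (out : List Int × List Int) : Prop := out = count_voids_alt rows
instance (rows : List String) (out : List Int × List Int) : Decidable (Spec_count_voids rows out) := by unfold Spec_count_voids; infer_instance

-- ===== CLAIM (what is proved, stated in full; the proofs are below) =====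
def Claim_equal_count_voids : Prop := ∀ (rows : List String), Dom_count_voids rows → Spec_count_voids rows (count_voids rows)

-- ===== LEMMAS AND PROOFS =====

-- exclusive prefix counts, as a structural recursion
def pcAux : List Bool → Int → List Int
  | [], _ => []
  | b :: t, c => c :: pcAux t (c + if b then 1 else 0)

theorem foldA_eq_pcAux {α : Type} (p : α → Bool) (l : List α) (acc : List Int) (c : Int) :
    (l.foldl (fun (acc : List Int × Int) e =>
      (acc.1 ++ [acc.2], if p e then acc.2 + 1 else acc.2)) (acc, c)).1
      = acc ++ pcAux (l.map p) c := by
  induction l generalizing acc c with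
  | nil => simp [pcAux]
  | cons e t ih =>
      simp only [List.foldl_cons, List.map_cons, pcAux, ih]
      by_cases h : p e <;> simp [h]

theorem pvPrefixB_eq_pcAux (bs : List Bool) : pvPrefixB bs = pcAux bs 0 := by
  have : ∀ (l : List Bool) (acc : List Int) (c : Int),
      (l.foldl (fun (acc : List Int × Int) b =>
        (acc.1 ++ [acc.2], acc.2 + (if b then 1 else 0))) (acc, c)).1 = acc ++ pcAux l c := by
    intro l
    induction l with
    | nil => simp [pcAux]
    | cons b t ih => intro acc c; simp [pcAux, ih]
  simpa using this bs [] 0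

-- the per-row inner loop only grows the set; membership characterization
theorem mem_inner_fold (w : Nat) (row : List Char) (s : PySem.Set Nat) (y : Nat) :
    (y ∈ (List.range w).foldl
      (fun s x => if row.getD x ' ' ≠ '.' then PySem.Set.add s x else s) s)
    ↔ (y ∈ s ∨ (y < w ∧ row.getD y ' ' ≠ '.')) := by
  have gen : ∀ (xs : List Nat) (s : PySem.Set Nat),
      (y ∈ xs.foldl (fun s x => if row.getD x ' ' ≠ '.' then PySem.Set.add s x else s) s)
      ↔ (y ∈ s ∨ (y ∈ xs ∧ row.getD y ' ' ≠ '.')) := by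
    intro xs
    induction xs with
    | nil => simp
    | cons x t ih =>
        intro s
        simp only [List.foldl_cons]
        by_cases h : row.getD x ' ' ≠ '.'
        · simp only [if_pos h, ih, PySem.Set.mem_add, List.mem_cons]
          constructor
          · rintro ((hs | rfl) | ht)
            · exact Or.inl hs
            · exact Or.inr ⟨Or.inl rfl, h⟩
            · exact Or.inr ⟨Or.inr ht.1, ht.2⟩
          · rintro (hs | ⟨(rfl | ht), hy⟩)
            · exact Or.inl (Or.inl hs)
            · exact Or.inl (Or.inr rfl)
            · exact Or.inr ⟨ht, hy⟩
        · simp only [if_neg h, ih, List.mem_cons]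
          rw [ne_eq, not_not] at h
          constructor
          · rintro (hs | ht)
            · exact Or.inl hs
            · exact Or.inr ⟨Or.inr ht.1, ht.2⟩
          · rintro (hs | ⟨(rfl | ht), hy⟩)
            · exact Or.inl hs
            · exact absurd h hy
            · exact Or.inr ⟨ht, hy⟩
  rw [gen]
  simp [List.mem_range]

-- characterization of the whole row fold: second component and set membership
theorem rowFold_snd (w : Nat) (rs : List (List Char)) (s : PySem.Set Nat) (er : List Bool) :
    (rs.foldl (fun (st : PySem.Set Nat × List Bool) row =>
      ((List.range w).foldl (fun s x => if row.getD x ' ' ≠ '.' then PySem.Set.add s x else s) st.1,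
       st.2 ++ [row.all (fun ch => ch = '.')])) (s, er)).2
    = er ++ rs.map (fun row => row.all (fun ch => ch = '.')) := by
  induction rs generalizing s er with
  | nil => simp
  | cons r t ih =>
      simp only [List.foldl_cons]
      rw [ih]
      simp

theorem rowFold_mem (w : Nat) (rs : List (List Char)) (s : PySem.Set Nat) (er : List Bool) (y : Nat) :
    (y ∈ (rs.foldl (fun (st : PySem.Set Nat × List Bool) row =>
      ((List.range w).foldl (fun s x => if row.getD x ' ' ≠ '.' then PySem.Set.add s x else s) st.1,
       st.2 ++ [row.all (fun ch => ch = '.')])) (s, er)).1)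
    ↔ (y ∈ s ∨ ∃ row ∈ rs, y < w ∧ row.getD y ' ' ≠ '.') := by
  induction rs generalizing s er with
  | nil => simp
  | cons r t ih =>
      simp only [List.foldl_cons, ih, mem_inner_fold, List.mem_cons]
      constructor
      · rintro ((hs | hr) | ⟨row, hm, hc⟩)
        · exact Or.inl hs
        · exact Or.inr ⟨r, Or.inl rfl, hr⟩
        · exact Or.inr ⟨row, Or.inr hm, hc⟩
      · rintro (hs | ⟨row, (rfl | hm), hc⟩)
        · exact Or.inl (Or.inl hs)
        · exact Or.inl (Or.inr hc)
        · exact Or.inr ⟨row, hm, hc⟩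

-- ===== VERDICT (by name: the statement is the Claim_ definition above) =====
theorem count_voids_spec : Claim_equal_count_voids := by
  intro rows _
  unfold Spec_count_voids count_voids count_voids_alt
  simp only []
  set rs := rows.map String.toList with hrs
  set w : Nat := ((rs.map List.length).min?).getD 0 with hw
  rw [foldA_eq_pcAux, foldA_eq_pcAux, pvPrefixB_eq_pcAux, pvPrefixB_eq_pcAux]
  simp only [List.nil_append, Prod.mk.injEq]
  constructor
  · -- x components
    congr 1
    rw [List.map_map]
    apply List.map_congr_left
    intro x hx
    have hxw : x < w := List.mem_range.mp hx
    have hmem := rowFold_mem w rs (PySem.Set.ofList []) [] x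
    rw [Bool.eq_iff_iff]
    simp only [Function.comp_def, List.all_eq_true, List.mem_map, Bool.not_eq_eq_eq_not,
      Bool.not_true, ← Bool.not_eq_true, PySem.Set.contains_iff, hmem]
    simp only [PySem.Set.mem_ofList, List.not_mem_nil, false_or, not_exists, not_and]
    constructor
    · rintro h row hm _
      have := h _ ⟨row, hm, rfl⟩
      simp_all
    · rintro h ch ⟨row, hm, rfl⟩
      have := h row hm hxw
      simp_all
  · -- y components
    rw [rowFold_snd]
    simp
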